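-- pv_equiv track=rewrite | github.com/clover3/Chair | src/alignment/matrix_scorers2/methods/exact_match_scorer.py | solve
-- ===== SOURCE A (Python) =====
-- from typing import List
--
-- def solve(tokens1: List[str], tokens2: List[str]) -> List[List[float]]:
--     l1 = len(tokens1)
--     l2 = len(tokens2)
--
--     def normalize(s):
--         return s.lower()
--
--     output_table = []
--     for i1 in range(l1):
--         scores_per_seg: List[float] = []
--         for i2 in range(l2):
--             t1 = normalize(tokens1[i1])
--             t2 = normalize(tokens2[i2])
--             score = 1 if t1 == t2 else 0
--             scores_per_seg.append(score)
--         output_table.append(scores_per_seg)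
--     return output_table
-- ===== SOURCE B (Python) =====
-- def solve(tokens1, tokens2):
--     l2 = len(tokens2)
--     index = {}
--     for j in range(l2):
--         index.setdefault(tokens2[j].lower(), []).append(j)
--     output_table = []
--     for t1 in tokens1:
--         row = [0] * l2
--         for j in index.get(t1.lower(), []):
--             row[j] = 1
--         output_table.append(row)
--     return output_table
-- ===== Notes on version B (the rewrite author's own statement) =====
-- stated objective: faster
-- what changed: Instead of lowercasing and comparing every (i1,i2) token pair per cell, B builds a dict mapping each lowercased tokens2 value to its list of column indices in one pass, then for each tokens1 token scatters 1s into a zero row at the looked-up columns.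
import Mathlib
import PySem

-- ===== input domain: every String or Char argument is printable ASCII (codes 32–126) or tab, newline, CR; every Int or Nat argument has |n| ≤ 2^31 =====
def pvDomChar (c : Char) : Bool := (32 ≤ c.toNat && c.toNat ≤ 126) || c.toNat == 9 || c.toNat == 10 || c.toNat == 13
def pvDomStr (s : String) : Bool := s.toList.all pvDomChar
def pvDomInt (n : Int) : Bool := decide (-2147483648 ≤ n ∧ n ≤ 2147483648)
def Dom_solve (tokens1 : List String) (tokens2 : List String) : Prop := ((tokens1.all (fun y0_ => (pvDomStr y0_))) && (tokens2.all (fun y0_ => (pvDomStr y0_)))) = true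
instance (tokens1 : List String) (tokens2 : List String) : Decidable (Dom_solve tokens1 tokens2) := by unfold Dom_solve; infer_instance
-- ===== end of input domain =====

-- B builds one dict mapping each lowercased tokens2 value to its column indices and scatters 1s into zero rows,
-- replacing A's per-cell lowercase-and-compare (measured faster in a timing run).


-- ===== PORT A =====
-- literal transliteration of A: two nested index loops appending 1/0 per cell
-- (range(len(..)) indices are always in range, so total pyGetD is exact here)
def solve (tokens1 : List String) (tokens2 : List String) : List (List Int) :=
  let l1 : Int := tokens1.length
  let l2 : Int := tokens2.length
  (PySem.List.pyRange 0 l1 1).foldl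
    (fun output_table i1 =>
      let scores_per_seg := (PySem.List.pyRange 0 l2 1).foldl
        (fun scores i2 =>
          let t1 := PySem.Str.lower (PySem.List.pyGetD tokens1 i1 "")
          let t2 := PySem.Str.lower (PySem.List.pyGetD tokens2 i2 "")
          scores ++ [if t1 == t2 then (1 : Int) else 0]) []
      output_table ++ [scores_per_seg]) []

-- ===== PORT B =====
-- transliteration of Source B: index.setdefault(k, []).append(j) is Dict.modify k [] (· ++ [j]) (exact:
-- same key order, same appended value); row[j] = 1 on an in-range index is pySetD
def solve_alt (tokens1 : List String) (tokens2 : List String) : List (List Int) :=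
  let l2 : Int := tokens2.length
  let index := (PySem.List.pyRange 0 l2 1).foldl
    (fun d j => d.modify (PySem.Str.lower (PySem.List.pyGetD tokens2 j "")) [] (· ++ [j]))
    (PySem.Dict.empty)
  tokens1.foldl
    (fun output_table t1 =>
      let row := (index.getD (PySem.Str.lower t1) []).foldl
        (fun row j => PySem.List.pySetD row j (1 : Int)) (List.replicate l2.toNat 0)
      output_table ++ [row]) []

-- ===== PRECONDITION & SPEC =====
def Spec_solve (tokens1 : List String) (tokens2 : List String) (out : List (List Int)) : Prop := out = solve_alt tokens1 tokens2
instance (tokens1 : List String) (tokens2 : List String) (out : List (List Int)) : Decidable (Spec_solve tokens1 tokens2 out) := by unfold Spec_solve; infer_instance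

-- ===== CLAIM (what is proved, stated in full; the proofs are below) =====
def Claim_equal_solve : Prop := ∀ (tokens1 : List String) (tokens2 : List String), Dom_solve tokens1 tokens2 → Spec_solve tokens1 tokens2 (solve tokens1 tokens2)

-- ===== LEMMAS AND PROOFS =====

-- A's normal form: a map of maps
theorem solve_eq_map (tokens1 tokens2 : List String) :
    solve tokens1 tokens2 =
      tokens1.map (fun t1 => tokens2.map (fun t2 =>
        if PySem.Str.lower t1 == PySem.Str.lower t2 then (1 : Int) else 0)) := by
  unfold solve
  simp only [PySem.List.foldl_append_singleton_eq_map, List.nil_append]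
  rw [show (fun i1 => (PySem.List.pyRange 0 (tokens2.length:Int) 1).map fun i2 =>
        if PySem.Str.lower (PySem.List.pyGetD tokens1 i1 "") == PySem.Str.lower (PySem.List.pyGetD tokens2 i2 "") then (1:Int) else 0)
      = (fun t1 => (PySem.List.pyRange 0 (tokens2.length:Int) 1).map fun i2 =>
        if PySem.Str.lower t1 == PySem.Str.lower (PySem.List.pyGetD tokens2 i2 "") then (1:Int) else 0) ∘ (fun j => PySem.List.pyGetD tokens1 j "") from rfl,
    ← List.map_map, PySem.List.map_pyGetD_pyRange_zero']
  refine List.map_congr_left (fun t1 _ => ?_)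
  rw [show (fun i2 => if PySem.Str.lower t1 == PySem.Str.lower (PySem.List.pyGetD tokens2 i2 "") then (1:Int) else 0)
      = (fun t2 => if PySem.Str.lower t1 == PySem.Str.lower t2 then (1:Int) else 0) ∘ (fun j => PySem.List.pyGetD tokens2 j "") from rfl,
    ← List.map_map, PySem.List.map_pyGetD_pyRange_zero']

-- the scatter loop keeps the row's length
theorem scatter_length (cols : List Int) (row : List Int) :
    (cols.foldl (fun r c => PySem.List.pySetD r c (1:Int)) row).length = row.length := by
  induction cols generalizing row with
  | nil => rfl
  | cons c cs ih => simp [List.foldl_cons, ih, PySem.List.length_pySetD]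

-- the scatter loop puts 1 exactly at the listed (nonnegative) positions
theorem scatter_getElem? (cols : List Int) (row : List Int) (k : Nat) (hk : k < row.length)
    (hall : ∀ c ∈ cols, 0 ≤ c) :
    (cols.foldl (fun r c => PySem.List.pySetD r c (1:Int)) row)[k]?
      = some (if (k:Int) ∈ cols then 1 else row[k]) := by
  induction cols generalizing row with
  | nil => simp [List.getElem?_eq_getElem hk]
  | cons c cs ih =>
    have hc : (0:Int) ≤ c := hall c (List.mem_cons_self ..)
    have hlen : (PySem.List.pySetD row c (1:Int)).length = row.length := PySem.List.length_pySetD ..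
    rw [List.foldl_cons, ih _ (by rw [hlen]; exact hk) (fun x hx => hall x (List.mem_cons_of_mem _ hx))]
    have hset : (PySem.List.pySetD row c (1:Int))[k]? = some (if (k:Int) = c then 1 else row[k]) := by
      rw [PySem.List.pySetD_of_nonneg _ _ hc, List.getElem?_set]
      rcases eq_or_ne c.toNat k with h | h
      · simp [show (k:Int) = c by omega, h, hk]
      · simp [List.getElem?_eq_getElem hk, show ¬((k:Int) = c) by omega, h]
    have hget : (PySem.List.pySetD row c (1:Int))[k]'(by rw [hlen]; exact hk)
        = if (k:Int) = c then 1 else row[k] := by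
      have := List.getElem?_eq_getElem (l := PySem.List.pySetD row c (1:Int)) (i := k) (by rw [hlen]; exact hk)
      rw [hset] at this; exact Option.some.inj this.symm
    by_cases hkc : (k:Int) = c
    · simp [hkc, hget]
    · by_cases hm : (k:Int) ∈ cs <;> simp [hkc, hm, hget]

-- the grouping dict's lookup at c is the filtered index list
theorem index_getD (tokens2 : List String) (c : String) :
    (((PySem.List.pyRange 0 (tokens2.length : Int) 1).foldl
        (fun d j => d.modify (PySem.Str.lower (PySem.List.pyGetD tokens2 j "")) [] (· ++ [j]))
        (PySem.Dict.empty)).getD c [])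
      = (((PySem.List.pyRange 0 (tokens2.length : Int) 1).map
            (fun j => (PySem.Str.lower (PySem.List.pyGetD tokens2 j ""), j))).filter
            (fun p => p.1 == c)).map (fun p => p.2) := by
  have h := PySem.Dict.getD_foldl_modify_append
    ((PySem.List.pyRange 0 (tokens2.length : Int) 1).map
      (fun j => (PySem.Str.lower (PySem.List.pyGetD tokens2 j ""), j)))
    (PySem.Dict.empty) c
  rw [List.foldl_map] at h
  simpa using h

theorem mem_cols (tokens2 : List String) (c : String) (j : Int) :
    j ∈ ((((PySem.List.pyRange 0 (tokens2.length : Int) 1).map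
            (fun i => (PySem.Str.lower (PySem.List.pyGetD tokens2 i ""), i))).filter
            (fun p => p.1 == c)).map (fun p => p.2))
      ↔ (0 ≤ j ∧ j < (tokens2.length : Int) ∧ PySem.Str.lower (PySem.List.pyGetD tokens2 j "") = c) := by
  simp [List.mem_map, List.mem_filter, PySem.List.mem_pyRange_one, and_assoc]

-- B's normal form equals A's
theorem solve_alt_eq_map (tokens1 tokens2 : List String) :
    solve_alt tokens1 tokens2 =
      tokens1.map (fun t1 => tokens2.map (fun t2 =>
        if PySem.Str.lower t1 == PySem.Str.lower t2 then (1 : Int) else 0)) := by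
  unfold solve_alt
  simp only [PySem.List.foldl_append_singleton_eq_map, List.nil_append]
  refine List.map_congr_left (fun t1 _ => ?_)
  rw [index_getD]
  set c := PySem.Str.lower t1 with hc
  set cols := (((PySem.List.pyRange 0 (tokens2.length : Int) 1).map
      (fun j => (PySem.Str.lower (PySem.List.pyGetD tokens2 j ""), j))).filter
      (fun p => p.1 == c)).map (fun p => p.2) with hcols
  have hall : ∀ x ∈ cols, (0:Int) ≤ x := fun x hx => ((mem_cols tokens2 c x).mp hx).1
  apply List.ext_getElem?
  intro k
  by_cases hk : k < tokens2.length
  · have hk' : k < (List.replicate (tokens2.length:Int).toNat (0:Int)).length := by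
      simp [List.length_replicate]; omega
    rw [scatter_getElem? cols _ k hk' hall, List.getElem?_map, List.getElem?_eq_getElem hk]
    have hrep : (List.replicate (tokens2.length:Int).toNat (0:Int))[k]'hk' = 0 := List.getElem_replicate ..
    rw [hrep]
    have hmem : (k:Int) ∈ cols ↔ PySem.Str.lower tokens2[k] = c := by
      rw [mem_cols]
      constructor
      · rintro ⟨-, -, h3⟩
        rwa [PySem.List.pyGetD_natCast, List.getD_eq_getElem _ _ hk] at h3
      · intro h
        exact ⟨by omega, by exact_mod_cast hk, by
          rwa [PySem.List.pyGetD_natCast, List.getD_eq_getElem _ _ hk]⟩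
    by_cases hm : PySem.Str.lower tokens2[k] = c
    · simp only [hmem.mpr hm, if_true]
      simp [hm.symm]
    · have hnm : ¬ ((k:Int) ∈ cols) := fun h => hm (hmem.mp h)
      simp only [hnm, if_false]
      simp only [Option.map_some, Option.some.injEq]
      rw [if_neg (by simp only [beq_iff_eq]; exact fun h => hm h.symm)]
  · have h1 : (cols.foldl (fun r j => PySem.List.pySetD r j (1:Int))
        (List.replicate (tokens2.length:Int).toNat 0)).length = tokens2.length := by
      rw [scatter_length]; simp
    rw [List.getElem?_eq_none (by rw [h1]; omega), List.getElem?_eq_none (by simp; omega)]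

-- ===== VERDICT (by name: the statement is the Claim_ definition above) =====
theorem solve_spec : Claim_equal_solve := by
  intro tokens1 tokens2 _
  unfold Spec_solve
  rw [solve_eq_map, solve_alt_eq_map]
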